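-- pv_equiv track=rewrite | github.com/Arcadia-Science/2025-asr-plms | ESM2_scoring/esm2_pppl_calculator.py | prepare_masked_batches
-- ===== SOURCE A (Python) =====
-- def prepare_masked_batches(sequences, mask_token, max_batch_size=32):
--     """Prepare batches of masked sequences efficiently."""
--     all_batches = []
--
--     for seq_label, seq in sequences:
--         seq_len = len(seq)
--         # Create masked sequences
--         masked_batch = []
--
--         for pos in range(seq_len):
--             # Create a masked sequence
--             masked_seq = list(seq)
--             masked_seq[pos] = mask_token
--             masked_seq = "".join(masked_seq)
--             masked_batch.append((f"{seq_label}_pos{pos}", masked_seq, pos))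
--
--             # If we've reached the batch size, add to all_batches and reset
--             if len(masked_batch) >= max_batch_size:
--                 all_batches.append(masked_batch)
--                 masked_batch = []
--
--         # Add any remaining sequences
--         if masked_batch:
--             all_batches.append(masked_batch)
--
--     return all_batches
-- ===== SOURCE B (Python) =====
-- def prepare_masked_batches(sequences, mask_token, max_batch_size=32):
--     """Prepare batches of masked sequences via per-sequence comprehension + chunking."""
--     step = max(1, max_batch_size)  # chunk size is at least 1
--     all_batches = []
--     for seq_label, seq in sequences:
--         full = [(f"{seq_label}_pos{pos}", seq[:pos] + mask_token + seq[pos + 1:], pos)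
--                 for pos in range(len(seq))]
--         for i in range(0, len(full), step):
--             all_batches.append(full[i:i + step])
--     return all_batches
-- ===== Notes on version B (the rewrite author's own statement) =====
-- stated objective: simpler
-- what changed: Replaces A's accumulate-and-flush batch state machine by a per-sequence list comprehension of all masked entries (built with string slicing instead of list-set-join) followed by an index-stride chunking pass with chunk size max(1, max_batch_size).
import Mathlib
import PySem

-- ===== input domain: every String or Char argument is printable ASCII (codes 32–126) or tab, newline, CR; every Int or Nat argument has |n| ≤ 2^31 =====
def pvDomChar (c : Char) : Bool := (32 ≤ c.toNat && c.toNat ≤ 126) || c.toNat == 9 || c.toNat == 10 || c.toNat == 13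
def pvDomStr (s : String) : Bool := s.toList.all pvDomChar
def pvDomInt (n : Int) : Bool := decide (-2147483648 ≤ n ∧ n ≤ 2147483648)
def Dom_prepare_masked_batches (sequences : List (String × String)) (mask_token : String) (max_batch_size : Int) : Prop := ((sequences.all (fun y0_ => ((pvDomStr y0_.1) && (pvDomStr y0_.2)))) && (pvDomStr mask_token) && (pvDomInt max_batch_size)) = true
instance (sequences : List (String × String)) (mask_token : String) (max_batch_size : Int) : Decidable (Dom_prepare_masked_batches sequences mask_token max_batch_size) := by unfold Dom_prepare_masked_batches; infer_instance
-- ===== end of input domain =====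

-- B replaces A's accumulate-and-flush batching by a per-sequence comprehension of all masked
-- entries (built by string slicing) followed by an index-stride chunking pass (objective: simpler).

-- ===== PORT A =====
def prepare_masked_batches (sequences : List (String × String)) (mask_token : String) (max_batch_size : Int) : List (List (String × String × Int)) :=
  -- for seq_label, seq in sequences: … (all_batches threaded through the fold)
  sequences.foldl (fun all_batches p =>
    let seq_len : Nat := (PySem.Str.len p.2).toNat   -- len(seq) (≥ 0), loop bound of range(seq_len)
    let st :=
      (List.range seq_len).foldl
        (fun (st : List (List (String × String × Int)) × List (String × String × Int)) (pos : Nat) =>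
          -- masked_seq = "".join(list(seq) with element pos replaced by mask_token)
          let masked_seq := PySem.Str.join "" ((p.2.toList.map (fun c => String.ofList [c])).set pos mask_token)
          let mb := st.2 ++ [(p.1 ++ "_pos" ++ PySem.Int.toStr (pos : Int), masked_seq, (pos : Int))]
          if max_batch_size ≤ (mb.length : Int) then (st.1 ++ [mb], []) else (st.1, mb))
        (all_batches, [])
    if st.2 = [] then st.1 else st.1 ++ [st.2]) []

-- ===== PORT B =====
def prepare_masked_batches_alt (sequences : List (String × String)) (mask_token : String) (max_batch_size : Int) : List (List (String × String × Int)) :=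
  let step : Int := max 1 max_batch_size
  sequences.foldl (fun all_batches p =>
    -- full = [(label_pos, seq[:pos] + mask_token + seq[pos+1:], pos) for pos in range(len(seq))]
    let full := (List.range (PySem.Str.len p.2).toNat).map
      (fun (pos : Nat) => (p.1 ++ "_pos" ++ PySem.Int.toStr (pos : Int),
                   PySem.Str.slice p.2 none (some (pos : Int)) ++ mask_token ++
                     PySem.Str.slice p.2 (some ((pos : Int) + 1)) none,
                   (pos : Int)))
    -- for i in range(0, len(full), step): all_batches.append(full[i:i+step])
    (PySem.List.pyRange 0 (full.length : Int) step).foldl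
      (fun acc i => acc ++ [PySem.List.slice full (some i) (some (i + step))]) all_batches) []

-- ===== PRECONDITION & SPEC =====
def Spec_prepare_masked_batches (sequences : List (String × String)) (mask_token : String) (max_batch_size : Int) (out : List (List (String × String × Int))) : Prop := out = prepare_masked_batches_alt sequences mask_token max_batch_size
instance (sequences : List (String × String)) (mask_token : String) (max_batch_size : Int) (out : List (List (String × String × Int))) : Decidable (Spec_prepare_masked_batches sequences mask_token max_batch_size out) := by unfold Spec_prepare_masked_batches; infer_instance

-- ===== CLAIM (what is proved, stated in full; the proofs are below) =====
def Claim_equal_prepare_masked_batches : Prop := ∀ (sequences : List (String × String)) (mask_token : String) (max_batch_size : Int), Dom_prepare_masked_batches sequences mask_token max_batch_size → Spec_prepare_masked_batches sequences mask_token max_batch_size (prepare_masked_batches sequences mask_token max_batch_size)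

-- ===== LEMMAS AND PROOFS =====

-- chunks of size m+1 (proof-side helper)
def chunksS {α : Type} (m : Nat) : List α → List (List α)
  | [] => []
  | x :: xs => (x :: xs.take m) :: chunksS m (xs.drop m)
termination_by l => l.length
decreasing_by
  simp only [List.length_drop, List.length_cons]
  omega

-- the flush step of A's inner loop, abstracted over the produced item
def flushStep {α : Type} (mbs : Int) (st : List (List α) × List α) (a : α) : List (List α) × List α :=
  let mb := st.2 ++ [a]
  if mbs ≤ (mb.length : Int) then (st.1 ++ [mb], []) else (st.1, mb)

-- the per-position item each port produces
def itemA (p : String × String) (mask_token : String) (pos : Nat) : String × String × Int :=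
  (p.1 ++ "_pos" ++ PySem.Int.toStr (pos : Int),
   PySem.Str.join "" ((p.2.toList.map (fun c => String.ofList [c])).set pos mask_token),
   (pos : Int))

def itemB (p : String × String) (mask_token : String) (pos : Nat) : String × String × Int :=
  (p.1 ++ "_pos" ++ PySem.Int.toStr (pos : Int),
   PySem.Str.slice p.2 none (some (pos : Int)) ++ mask_token ++
     PySem.Str.slice p.2 (some ((pos : Int) + 1)) none,
   (pos : Int))

theorem chunksS_nil {α : Type} (m : Nat) : chunksS (α := α) m [] = [] := by
  rw [chunksS]

theorem chunksS_cons {α : Type} (m : Nat) (x : α) (xs : List α) :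
    chunksS m (x :: xs) = (x :: xs.take m) :: chunksS m (xs.drop m) := by
  rw [chunksS]

theorem chunksS_cons_full {α : Type} (m : Nat) (mb rest : List α) (h : mb.length = m + 1) :
    chunksS m (mb ++ rest) = mb :: chunksS m rest := by
  cases mb with
  | nil => simp at h
  | cons x xs =>
    have hx : xs.length = m := by simpa using h
    subst hx
    rw [List.cons_append, chunksS_cons, List.take_left, List.drop_left]

theorem chunksS_short {α : Type} (m : Nat) (cur : List α) (h : cur.length ≤ m) (hne : cur ≠ []) :
    chunksS m cur = [cur] := by
  cases cur with
  | nil => simp at hne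
  | cons x xs =>
    have hxs : xs.length ≤ m := by simp at h; omega
    rw [chunksS_cons, List.take_of_length_le hxs, List.drop_of_length_le hxs, chunksS_nil]

theorem flush_eq {α : Type} (mbs : Int) (m : Nat) (hm : (m : Int) + 1 = max 1 mbs)
    (items : List α) : ∀ (all : List (List α)) (cur : List α), cur.length ≤ m →
      (if (items.foldl (flushStep mbs) (all, cur)).2 = []
       then (items.foldl (flushStep mbs) (all, cur)).1
       else (items.foldl (flushStep mbs) (all, cur)).1 ++ [(items.foldl (flushStep mbs) (all, cur)).2])
      = all ++ chunksS m (cur ++ items) := by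
  induction items with
  | nil =>
    intro all cur hcur
    simp only [List.foldl_nil, List.append_nil]
    by_cases h : cur = []
    · subst h; simp [chunksS_nil]
    · rw [if_neg h, chunksS_short m cur hcur h]
  | cons a items ih =>
    intro all cur hcur
    simp only [List.foldl_cons]
    by_cases h : mbs ≤ ((cur ++ [a]).length : Int)
    · have hflush : flushStep mbs (all, cur) a = (all ++ [cur ++ [a]], []) := by
        simp only [flushStep]; rw [if_pos h]
      have hlen : (cur ++ [a]).length = m + 1 := by
        simp only [List.length_append, List.length_cons, List.length_nil] at h ⊢
        omega
      rw [hflush, ih (all ++ [cur ++ [a]]) [] (by simp)]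
      have hsplit : cur ++ a :: items = (cur ++ [a]) ++ items := by simp
      rw [hsplit, chunksS_cons_full m _ _ hlen]
      simp
    · have hkeep : flushStep mbs (all, cur) a = (all, cur ++ [a]) := by
        simp only [flushStep]; rw [if_neg h]
      have hlen : (cur ++ [a]).length ≤ m := by
        simp only [List.length_append, List.length_cons, List.length_nil] at h ⊢
        omega
      rw [hkeep, ih all (cur ++ [a]) hlen]
      have hsplit : cur ++ a :: items = (cur ++ [a]) ++ items := by simp
      rw [hsplit]

theorem pyRange_nonpos (b s : Int) (hs : 0 < s) (hb : b ≤ 0) :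
    PySem.List.pyRange 0 b s = [] := by
  rw [PySem.List.pyRange_of_pos 0 b hs, if_neg (by omega)]
  simp

theorem pyRange_pos_cons (a b s : Int) (hs : 0 < s) (hab : a < b) :
    PySem.List.pyRange a b s = a :: PySem.List.pyRange (a + s) b s := by
  rw [PySem.List.pyRange_of_pos a b hs, PySem.List.pyRange_of_pos (a + s) b hs]
  have hdiv : (b - a + s - 1) / s = (b - a - 1) / s + 1 := by
    have h1 : b - a + s - 1 = (b - a - 1) + 1 * s := by ring
    rw [h1, Int.add_mul_ediv_right _ _ (ne_of_gt hs)]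
  have hq0 : 0 ≤ (b - a - 1) / s := Int.ediv_nonneg (by omega) (by omega)
  have hcount : (if a < b then ((b - a + s - 1) / s).toNat else 0)
      = (if a + s < b then ((b - (a + s) + s - 1) / s).toNat else 0) + 1 := by
    rw [if_pos hab, hdiv]
    by_cases h2 : a + s < b
    · rw [if_pos h2]
      have he : b - (a + s) + s - 1 = b - a - 1 := by ring
      rw [he]
      omega
    · rw [if_neg h2]
      have hz : (b - a - 1) / s = 0 := Int.ediv_eq_zero_of_lt (by omega) (by omega)
      rw [hz]
      decide
  rw [hcount, List.range_succ_eq_map, List.map_cons, List.map_map]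
  refine congrArg₂ (· :: ·) ?_ ?_
  · simp
  · refine List.map_congr_left fun k _ => ?_
    simp only [Function.comp_apply]
    push_cast
    ring

theorem pyRange_shift (b s : Int) (hs : 0 < s) :
    PySem.List.pyRange s b s = (PySem.List.pyRange 0 (b - s) s).map (fun i => i + s) := by
  rw [PySem.List.pyRange_of_pos s b hs, PySem.List.pyRange_of_pos 0 (b - s) hs, List.map_map]
  have hcount : (if s < b then ((b - s + s - 1) / s).toNat else 0)
      = (if 0 < b - s then ((b - s - 0 + s - 1) / s).toNat else 0) := by
    by_cases h : s < b
    · rw [if_pos h, if_pos (by omega)]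
      have he : b - s - 0 + s - 1 = b - s + s - 1 := by ring
      rw [he]
    · rw [if_neg h, if_neg (by omega)]
  rw [hcount]
  refine List.map_congr_left fun k _ => ?_
  simp only [Function.comp_apply]
  ring

theorem slice_shift {α : Type} (l : List α) (d : Nat) (i c : Int) (hi : 0 ≤ i) (hc : 0 ≤ c) :
    PySem.List.slice l (some (i + (d : Int))) (some (i + (d : Int) + c))
      = PySem.List.slice (l.drop d) (some i) (some (i + c)) := by
  rw [PySem.List.slice_toNat, PySem.List.slice_toNat, List.drop_drop]
  have e2 : (i + (d : Int) + c).toNat - (i + (d : Int)).toNat = (i + c).toNat - i.toNat := by omega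
  have e1 : (i + (d : Int)).toNat = d + i.toNat := by omega
  rw [e2, e1]
  all_goals omega

theorem slices_eq_chunksS {α : Type} (m : Nat) (l : List α) :
    (PySem.List.pyRange 0 (l.length : Int) ((m : Int) + 1)).map
      (fun i => PySem.List.slice l (some i) (some (i + ((m : Int) + 1)))) = chunksS m l := by
  induction l using chunksS.induct m with
  | case1 =>
    have h0 : (([] : List α).length : Int) = 0 := by simp
    rw [h0, pyRange_nonpos 0 ((m : Int) + 1) (by omega) le_rfl, List.map_nil, chunksS_nil]
  | case2 x xs ih =>
    have hs : (0 : Int) < (m : Int) + 1 := by omega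
    have hlen : (0 : Int) < (((x :: xs).length : Nat) : Int) := by
      simp only [List.length_cons]; push_cast; omega
    rw [pyRange_pos_cons 0 _ _ hs hlen, List.map_cons, chunksS_cons]
    refine congrArg₂ (· :: ·) ?_ ?_
    · show PySem.List.slice (x :: xs) (some 0) (some (0 + ((m : Int) + 1))) = x :: xs.take m
      have hc : ((m : Int) + 1) = (((m + 1 : Nat) : Int)) := by push_cast; ring
      rw [zero_add, hc, PySem.List.slice_zero_start, PySem.List.slice_to_natCast,
        List.take_succ_cons]
    · rw [zero_add, pyRange_shift _ _ hs, List.map_map]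
      by_cases hml : m ≤ xs.length
      · have hlen2 : (((x :: xs).length : Nat) : Int) - ((m : Int) + 1)
            = (((xs.drop m).length : Nat) : Int) := by
          simp only [List.length_cons, List.length_drop]
          push_cast [Nat.cast_sub hml]
          ring
        rw [hlen2]
        have hmap : (PySem.List.pyRange 0 (((xs.drop m).length : Nat) : Int) ((m : Int) + 1)).map
              ((fun i => PySem.List.slice (x :: xs) (some i) (some (i + ((m : Int) + 1))))
                ∘ (fun i => i + ((m : Int) + 1)))
            = (PySem.List.pyRange 0 (((xs.drop m).length : Nat) : Int) ((m : Int) + 1)).map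
              (fun i => PySem.List.slice (xs.drop m) (some i) (some (i + ((m : Int) + 1)))) := by
          refine List.map_congr_left fun i hmem => ?_
          have h0i : 0 ≤ i := ((PySem.List.mem_pyRange_iff_of_pos hs i).mp hmem).1
          show PySem.List.slice (x :: xs) (some (i + ((m : Int) + 1)))
              (some (i + ((m : Int) + 1) + ((m : Int) + 1)))
            = PySem.List.slice (xs.drop m) (some i) (some (i + ((m : Int) + 1)))
          have hc : ((m : Int) + 1) = (((m + 1 : Nat) : Int)) := by push_cast; ring
          rw [hc, slice_shift (x :: xs) (m + 1) i _ h0i (by positivity)]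
          rfl
        rw [hmap, ih]
      · have h1 : PySem.List.pyRange 0 ((((x :: xs).length : Nat) : Int) - ((m : Int) + 1))
            ((m : Int) + 1) = [] := by
          refine pyRange_nonpos _ _ hs ?_
          simp only [List.length_cons]
          push_cast
          omega
        have h2 : xs.drop m = [] := List.drop_eq_nil_of_le (by omega)
        rw [h1, h2, List.map_nil, chunksS_nil]

theorem flatten_singletons (cs : List Char) : (cs.map (fun c => [c])).flatten = cs := by
  induction cs with
  | nil => simp
  | cons c cs ih => simp [ih]

theorem flatten_set (mt : List Char) : ∀ (cs : List Char) (p : Nat), p < cs.length →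
    ((cs.map (fun c => [c])).set p mt).flatten = cs.take p ++ mt ++ cs.drop (p + 1)
  | c :: cs, 0, _ => by simp [flatten_singletons]
  | c :: cs, p + 1, h => by
    have ih := flatten_set mt cs p (by simpa using h)
    simp [ih]

theorem join_nil_eq_flatten (l : List (List Char)) : PySem.Chars.join [] l = l.flatten := by
  induction l with
  | nil => simp [PySem.Chars.join_nil]
  | cons a t ih =>
    cases t with
    | nil => simp [PySem.Chars.join_singleton]
    | cons b r =>
      rw [PySem.Chars.join_cons_cons]
      simp only [List.flatten_cons] at *
      simp [ih]

theorem mask_eq (seq mask_token : String) (p : Nat) (hp : p < seq.toList.length) :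
    PySem.Str.join "" ((seq.toList.map (fun c => String.ofList [c])).set p mask_token)
      = PySem.Str.slice seq none (some (p : Int)) ++ mask_token ++
          PySem.Str.slice seq (some ((p : Int) + 1)) none := by
  apply String.toList_injective
  rw [PySem.Str.toList_join, List.map_set, List.map_map]
  have h1 : (String.toList ∘ fun c => String.ofList [c]) = fun c => [c] := funext fun c => by simp
  have h2 : ("" : String).toList = [] := rfl
  rw [h1, h2, join_nil_eq_flatten, flatten_set mask_token.toList seq.toList p hp]
  rw [String.toList_append, String.toList_append]
  have h3 : (PySem.Str.slice seq none (some (p : Int))).toList = seq.toList.take p := by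
    simp [PySem.Str.toList_slice, PySem.List.slice_to_natCast]
  have h4 : (PySem.Str.slice seq (some ((p : Int) + 1)) none).toList = seq.toList.drop (p + 1) := by
    have hc : ((p : Int) + 1) = (((p + 1 : Nat) : Int)) := by push_cast; ring
    rw [hc]
    simp only [PySem.Str.toList_slice, PySem.Chars.slice_eq_listSlice]
    rw [PySem.List.slice_from_natCast]
  rw [h3, h4]

theorem foldl_append_single {α β : Type} (l : List α) (g : α → β) :
    ∀ acc : List β, l.foldl (fun a x => a ++ [g x]) acc = acc ++ l.map g := by
  induction l with
  | nil => intro acc; simp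
  | cons x t ih => intro acc; simp [ih]

theorem items_eq (p : String × String) (mask_token : String) :
    (List.range (PySem.Str.len p.2).toNat).map (itemA p mask_token)
      = (List.range (PySem.Str.len p.2).toNat).map (itemB p mask_token) := by
  refine List.map_congr_left fun pos hpos => ?_
  have hlt : pos < p.2.toList.length := by
    have := List.mem_range.mp hpos
    simp only [PySem.Str.len_eq] at this
    omega
  unfold itemA itemB
  rw [mask_eq p.2 mask_token pos hlt]

theorem step_eq (mask_token : String) (mbs : Int) (m : Nat) (hm : (m : Int) + 1 = max 1 mbs)
    (acc : List (List (String × String × Int))) (p : String × String) :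
    (let seq_len : Nat := (PySem.Str.len p.2).toNat
     let st :=
       (List.range seq_len).foldl
         (fun (st : List (List (String × String × Int)) × List (String × String × Int)) (pos : Nat) =>
           let masked_seq := PySem.Str.join "" ((p.2.toList.map (fun c => String.ofList [c])).set pos mask_token)
           let mb := st.2 ++ [(p.1 ++ "_pos" ++ PySem.Int.toStr (pos : Int), masked_seq, (pos : Int))]
           if mbs ≤ (mb.length : Int) then (st.1 ++ [mb], []) else (st.1, mb))
         (acc, [])
     if st.2 = [] then st.1 else st.1 ++ [st.2])
    = (let full := (List.range (PySem.Str.len p.2).toNat).map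
         (fun (pos : Nat) => (p.1 ++ "_pos" ++ PySem.Int.toStr (pos : Int),
                      PySem.Str.slice p.2 none (some (pos : Int)) ++ mask_token ++
                        PySem.Str.slice p.2 (some ((pos : Int) + 1)) none,
                      (pos : Int)))
       (PySem.List.pyRange 0 (full.length : Int) (max 1 mbs)).foldl
         (fun acc2 i => acc2 ++ [PySem.List.slice full (some i) (some (i + max 1 mbs))]) acc) := by
  show (if ((List.range (PySem.Str.len p.2).toNat).foldl
        (fun st pos => flushStep mbs st (itemA p mask_token pos)) (acc, [])).2 = []
      then ((List.range (PySem.Str.len p.2).toNat).foldl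
        (fun st pos => flushStep mbs st (itemA p mask_token pos)) (acc, [])).1
      else ((List.range (PySem.Str.len p.2).toNat).foldl
        (fun st pos => flushStep mbs st (itemA p mask_token pos)) (acc, [])).1
        ++ [((List.range (PySem.Str.len p.2).toNat).foldl
        (fun st pos => flushStep mbs st (itemA p mask_token pos)) (acc, [])).2])
    = (PySem.List.pyRange 0
        ((((List.range (PySem.Str.len p.2).toNat).map (itemB p mask_token)).length : Nat) : Int)
        (max 1 mbs)).foldl
        (fun acc2 i => acc2 ++ [PySem.List.slice
          ((List.range (PySem.Str.len p.2).toNat).map (itemB p mask_token)) (some i)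
          (some (i + max 1 mbs))]) acc
  rw [show (List.range (PySem.Str.len p.2).toNat).foldl
        (fun st pos => flushStep mbs st (itemA p mask_token pos)) (acc, [])
      = ((List.range (PySem.Str.len p.2).toNat).map (itemA p mask_token)).foldl
        (flushStep mbs) (acc, []) from List.foldl_map.symm]
  rw [flush_eq mbs m hm ((List.range (PySem.Str.len p.2).toNat).map (itemA p mask_token)) acc []
      (by simp)]
  rw [List.nil_append, items_eq p mask_token]
  rw [foldl_append_single]
  rw [← hm, slices_eq_chunksS m ((List.range (PySem.Str.len p.2).toNat).map (itemB p mask_token))]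

theorem main_eq (sequences : List (String × String)) (mask_token : String) (mbs : Int) :
    prepare_masked_batches sequences mask_token mbs
      = prepare_masked_batches_alt sequences mask_token mbs := by
  obtain ⟨m, hm⟩ : ∃ m : Nat, (m : Int) + 1 = max 1 mbs := ⟨(max 1 mbs - 1).toNat, by omega⟩
  unfold prepare_masked_batches prepare_masked_batches_alt
  refine PySem.List.foldl_congr_mem _ _ _ _ ?_
  intro acc p _
  exact step_eq mask_token mbs m hm acc p

-- ===== VERDICT (by name: the statement is the Claim_ definition above) =====
theorem prepare_masked_batches_spec : Claim_equal_prepare_masked_batches := by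
  intro sequences mask_token max_batch_size _hdom
  exact main_eq sequences mask_token max_batch_size
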